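-- pv_equiv track=rewrite | github.com/venthur/aoc | 2024/04/main.py | findall_diagonal
-- ===== SOURCE A (Python) =====
-- def findall_diagonal(strings, sub):
--     found = 0
--     for y in range(len(strings)):
--         for x in range(len(strings[y])):
--             for i, char in enumerate(sub):
--                 try:
--                     if strings[y+i][x+i] != char:
--                         break
--                 except IndexError:
--                     break
--             else:
--                 found += 1
--     return found
-- ===== SOURCE B (Python) =====
-- def findall_diagonal(strings, sub):
--     rows = len(strings)
--     maxlen = max((len(s) for s in strings), default=0)
--     total = 0
--     for d in range(-(rows - 1), maxlen) if rows else range(0):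
--         # walk the diagonal x - y == d (only where 0 <= x < maxlen is possible),
--         # splitting it into contiguous segments at gaps
--         seg = ""
--         for y in range(max(0, -d), min(rows, maxlen - d)):
--             x = y + d
--             if 0 <= x < len(strings[y]):
--                 seg += strings[y][x]
--             else:
--                 total += sum(1 for j in range(len(seg)) if seg.startswith(sub, j))
--                 seg = ""
--         total += sum(1 for j in range(len(seg)) if seg.startswith(sub, j))
--     return total
-- ===== Notes on version B (the rewrite author's own statement) =====
-- stated objective: alternative
-- what changed: B walks each down-right diagonal once, splitting it into contiguous segments at jagged gaps, and counts overlapping slice matches of sub inside every segment, instead of A's per-cell character-by-character probe with IndexError breaks.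
import Mathlib
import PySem

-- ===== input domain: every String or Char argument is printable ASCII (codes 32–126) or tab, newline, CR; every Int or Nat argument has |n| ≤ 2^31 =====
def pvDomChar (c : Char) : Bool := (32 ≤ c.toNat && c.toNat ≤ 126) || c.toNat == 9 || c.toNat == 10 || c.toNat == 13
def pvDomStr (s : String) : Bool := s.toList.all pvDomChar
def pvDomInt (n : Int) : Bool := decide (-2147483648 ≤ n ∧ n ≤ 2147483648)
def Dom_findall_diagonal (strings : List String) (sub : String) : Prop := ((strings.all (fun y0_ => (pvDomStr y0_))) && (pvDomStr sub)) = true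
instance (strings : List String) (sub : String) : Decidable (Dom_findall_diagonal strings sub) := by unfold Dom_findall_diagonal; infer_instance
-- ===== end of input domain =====

-- B builds each down-right diagonal as contiguous segments (split at jagged gaps) and counts
-- overlapping slice matches per segment, instead of A's per-cell probe; objective: alternative.

-- ===== PORT A =====
-- inner 'for i, char in enumerate(sub)' with try/except IndexError: returns true iff the loop completes (for-else)
def pvChkA (strings : List String) (y x : Int) : List (Int × Char) → Bool
  | [] => true
  | (i, c) :: rest =>
    match PySem.List.pyGet? strings (y + i) with
    | none => false
    | some row =>
      match PySem.Str.pyGet? row (x + i) with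
      | none => false
      | some ch => if ch ≠ c then false else pvChkA strings y x rest

def findall_diagonal (strings : List String) (sub : String) : Int :=
  (PySem.List.pyRange 0 strings.length 1).foldl (fun found y =>
    (PySem.List.pyRange 0 (PySem.Str.len (PySem.List.pyGetD strings y "")) 1).foldl (fun found x =>
      if pvChkA strings y x (PySem.List.enumerate sub.toList) then found + 1 else found) found) 0

-- ===== PORT B =====
-- sum(1 for j in range(len(seg)) if seg.startswith(sub, j)); 'seg.startswith(sub, j)' (prefix test
-- at offset j, no copy) is ported by hand as a prefix test on 'seg.drop j' - exact for the 0 <= j < len(seg)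
-- produced by the range
def pvCountOcc (seg : List Char) (sub : List Char) : Int :=
  (PySem.List.pyRange 0 seg.length 1).foldl
    (fun t j => if PySem.Chars.startswith (seg.drop j.toNat) sub then t + 1 else t) 0

def findall_diagonal_alt (strings : List String) (sub : String) : Int :=
  let rows : Int := strings.length
  let maxlen : Int := strings.foldl (fun m s => max m (PySem.Str.len s)) 0
  let ds := if rows ≠ 0 then PySem.List.pyRange (-(rows - 1)) maxlen 1 else PySem.List.pyRange 0 0 1
  ds.foldl (fun total d =>
    let st := (PySem.List.pyRange (max 0 (-d)) (min rows (maxlen - d)) 1).foldl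
      (fun (st : List Char × Int) y =>
        let x := y + d
        let row := PySem.List.pyGetD strings y ""
        if 0 ≤ x ∧ x < PySem.Str.len row then
          (st.1 ++ [PySem.List.pyGetD row.toList x ' '], st.2)
        else
          ([], st.2 + pvCountOcc st.1 sub.toList)) ([], total)
    st.2 + pvCountOcc st.1 sub.toList) 0

-- ===== PRECONDITION & SPEC =====
def Spec_findall_diagonal (strings : List String) (sub : String) (out : Int) : Prop := out = findall_diagonal_alt strings sub
instance (strings : List String) (sub : String) (out : Int) : Decidable (Spec_findall_diagonal strings sub out) := by unfold Spec_findall_diagonal; infer_instance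

-- ===== CLAIM (what is proved, stated in full; the proofs are below) =====
def Claim_equal_findall_diagonal : Prop := ∀ (strings : List String) (sub : String), Dom_findall_diagonal strings sub → Spec_findall_diagonal strings sub (findall_diagonal strings sub)

-- ===== LEMMAS AND PROOFS =====

-- ---- proof-side definitions ----
def b2i (b : Bool) : Int := if b then 1 else 0

def sumR (n : Nat) (f : Nat → Int) : Int := ((List.range n).map f).sum

def cellN (strings : List String) (y x : Nat) : Option Char :=
  match strings[y]? with
  | some r => r.toList[x]?
  | none => none

def cellI (strings : List String) (y : Nat) (x : Int) : Option Char :=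
  if 0 ≤ x then cellN strings y x.toNat else none

def rowL (strings : List String) (y : Nat) : List Char := (strings.getD y "").toList

def MA (strings : List String) (s : List Char) (y x : Nat) : Bool :=
  decide (∀ i, (h : i < s.length) → cellN strings (y + i) (x + i) = some s[i])

def ASum (strings : List String) (s : List Char) : Int :=
  sumR strings.length (fun y => sumR (rowL strings y).length (fun x => b2i (MA strings s y x)))

def cnt (s seg : List Char) : Int :=
  sumR seg.length (fun j => b2i (decide ((seg.drop j).take s.length = s)))

def matchT (s : List Char) (t : List (Option Char)) (j : Nat) : Bool :=
  decide (∀ i, (h : i < s.length) → t.getD (j + i) none = some s[i])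

def hitv (s : List Char) (t : List (Option Char)) (j : Nat) : Int :=
  b2i ((t.getD j none).isSome && matchT s t j)

def hits (s : List Char) (t : List (Option Char)) : Int := sumR t.length (hitv s t)

def runFold (s : List Char) : List (Option Char) → (List Char × Int) → (List Char × Int)
  | [], st => st
  | (some c) :: t, st => runFold s t (st.1 ++ [c], st.2)
  | none :: t, st => runFold s t ([], st.2 + cnt s st.1)

def tD (strings : List String) (d : Int) : List (Option Char) :=
  (List.range strings.length).map (fun y => cellI strings y (↑y + d))

def maxlenN (strings : List String) : Nat := strings.foldl (fun m s => max m s.toList.length) 0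

-- ---- generic sum lemmas ----

theorem sumR_congr {n : Nat} {f g : Nat → Int} (h : ∀ i, i < n → f i = g i) : sumR n f = sumR n g := by
  unfold sumR
  congr 1
  apply List.map_congr_left
  intro i hi
  exact h i (List.mem_range.mp hi)
theorem sumR_add (m n : Nat) (f : Nat → Int) : sumR (m + n) f = sumR m f + sumR n (fun i => f (m + i)) := by
  unfold sumR
  rw [List.range_add, List.map_append, List.sum_append, List.map_map]
  rfl
theorem sumR_zero {n : Nat} {f : Nat → Int} (h : ∀ i, i < n → f i = 0) : sumR n f = 0 := by
  have : sumR n f = sumR n (fun _ => 0) := sumR_congr h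
  rw [this]
  unfold sumR
  simp
theorem sumR_finset (n : Nat) (f : Nat → Int) : sumR n f = ∑ i ∈ Finset.range n, f i := by
  induction n with
  | zero => simp [sumR]
  | succ k ih =>
    unfold sumR at *
    rw [List.range_succ, List.map_append, List.sum_append, Finset.sum_range_succ, ih]
    simp
theorem sumR_comm (m n : Nat) (f : Nat → Nat → Int) :
    sumR m (fun a => sumR n (fun b => f a b)) = sumR n (fun b => sumR m (fun a => f a b)) := by
  simp only [sumR_finset]
  exact Finset.sum_comm

-- ---- A side ----
def cellZ (strings : List String) (y x : Int) : Option Char :=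
  match PySem.List.pyGet? strings y with
  | none => none
  | some r => PySem.Str.pyGet? r x


theorem chkA_eq (strings : List String) (s : List Char) : ∀ (n y x : Int),
    pvChkA strings y x (PySem.List.enumerate s n) =
      decide (∀ j, (h : j < s.length) → cellZ strings (y + n + ↑j) (x + n + ↑j) = some s[j]) := by
  induction s with
  | nil =>
    intro n y x
    simp [PySem.List.enumerate_nil, pvChkA]
  | cons c s' ih =>
    intro n y x
    rw [PySem.List.enumerate_cons]
    simp only [pvChkA]
    have h0 : cellZ strings (y + n + ↑(0 : Nat)) (x + n + ↑(0 : Nat)) = cellZ strings (y + n) (x + n) := by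
      norm_num
    cases hr : PySem.List.pyGet? strings (y + n) with
    | none =>
      symm
      simp only [decide_eq_false_iff_not]
      intro hall
      have := hall 0 (by simp)
      rw [h0] at this
      simp [cellZ, hr] at this
    | some row =>
      cases hc : PySem.Str.pyGet? row (x + n) with
      | none =>
        have hc' : PySem.List.pyGet? row.toList (x + n) = none := by simpa using hc
        dsimp only
        rw [hc]
        symm
        simp only [decide_eq_false_iff_not]
        intro hall
        have := hall 0 (by simp)
        rw [h0] at this
        simp [cellZ, hr] at this
        rw [hc'] at this
        exact absurd this (by simp)
      | some ch =>
        have hc' : PySem.List.pyGet? row.toList (x + n) = some ch := by simpa using hc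
        dsimp only
        rw [hc]
        dsimp only
        by_cases hch : ch = c
        · subst hch
          rw [if_neg (by simp)]
          rw [ih (n + 1) y x]
          simp only [decide_eq_decide]
          constructor
          · intro h j hj
            cases j with
            | zero =>
              rw [h0]
              simp [cellZ, hr, hc']
            | succ j' =>
              have hj' : j' < s'.length := by simpa using hj
              have := h j' hj'
              have harith : y + (n + 1) + (↑j' : Int) = y + n + ↑(j' + 1) := by push_cast; ring
              have harith2 : x + (n + 1) + (↑j' : Int) = x + n + ↑(j' + 1) := by push_cast; ring
              rw [harith, harith2] at this
              simpa using this
          · intro h j hj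
            have hj1 : j + 1 < (ch :: s').length := by simpa using Nat.succ_lt_succ hj
            have := h (j + 1) hj1
            have harith : y + n + (↑(j + 1) : Int) = y + (n + 1) + ↑j := by push_cast; ring
            have harith2 : x + n + (↑(j + 1) : Int) = x + (n + 1) + ↑j := by push_cast; ring
            rw [harith, harith2] at this
            simpa using this
        · rw [if_pos (by simp [hch])]
          symm
          simp only [decide_eq_false_iff_not]
          intro hall
          have := hall 0 (by simp)
          rw [h0] at this
          simp [cellZ, hr, hc'] at this
          exact hch this
theorem cellZ_natCast (strings : List String) (y x : Nat) :
    cellZ strings (↑y) (↑x) = cellN strings y x := by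
  cases h : strings[y]? <;> simp [cellZ, cellN, h]

theorem chk_eq_MA (strings : List String) (s : List Char) (y x : Nat) :
    pvChkA strings (↑y) (↑x) (PySem.List.enumerate s) = MA strings s y x := by
  have h := chkA_eq strings s 0 (↑y) (↑x)
  rw [show PySem.List.enumerate s = PySem.List.enumerate s 0 from rfl, h]
  unfold MA
  simp only [decide_eq_decide]
  constructor
  · intro hh j hj
    have := hh j hj
    have e1 : (↑y : Int) + 0 + ↑j = ↑(y + j) := by push_cast; ring
    have e2 : (↑x : Int) + 0 + ↑j = ↑(x + j) := by push_cast; ring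
    rw [e1, e2, cellZ_natCast] at this
    exact this
  · intro hh j hj
    have := hh j hj
    have e1 : (↑y : Int) + 0 + ↑j = ↑(y + j) := by push_cast; ring
    have e2 : (↑x : Int) + 0 + ↑j = ↑(x + j) := by push_cast; ring
    rw [e1, e2, cellZ_natCast]
    exact this

theorem foldl_sumR (n : Nat) (F : Int → Nat → Int) (g : Nat → Int)
    (hF : ∀ acc i, i < n → F acc i = acc + g i) (a : Int) :
    (List.range n).foldl F a = a + sumR n g := by
  induction n generalizing a with
  | zero => simp [sumR]
  | succ k ih =>
    rw [List.range_succ, List.foldl_append]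
    have ih' := ih (fun acc i hi => hF acc i (Nat.lt_succ_of_lt hi)) a
    rw [ih']
    simp only [List.foldl_cons, List.foldl_nil]
    rw [hF _ k (Nat.lt_succ_self k)]
    have : sumR (k + 1) g = sumR k g + g k := by
      unfold sumR; rw [List.range_succ]; simp
    omega

theorem A_eq_ASum (strings : List String) (sub : String) :
    findall_diagonal strings sub = ASum strings sub.toList := by
  unfold findall_diagonal ASum
  rw [PySem.List.pyRange_zero_natCast]
  rw [List.foldl_map]
  rw [foldl_sumR strings.length _ (fun y => sumR (rowL strings y).length (fun x => b2i (MA strings sub.toList y x)))]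
  · simp
  · intro acc y hy
    have hlen : PySem.Str.len (PySem.List.pyGetD strings (↑y) "") = (↑(rowL strings y).length : Int) := by
      simp [PySem.Str.len_eq, rowL]
    rw [hlen, PySem.List.pyRange_zero_natCast, List.foldl_map]
    rw [foldl_sumR (rowL strings y).length _ (fun x => b2i (MA strings sub.toList y x))]
    intro acc2 x hx
    rw [chk_eq_MA]
    unfold b2i
    split_ifs <;> simp

-- ---- B side: countOcc ----
theorem countOcc_eq (seg s : List Char) : pvCountOcc seg s = cnt s seg := by
  unfold pvCountOcc cnt
  rw [PySem.List.pyRange_zero_natCast, List.foldl_map]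
  rw [foldl_sumR seg.length _ (fun j => b2i (decide ((seg.drop j).take s.length = s)))]
  · simp
  · intro acc j hj
    simp only [Int.toNat_natCast]
    by_cases hp : (seg.drop j).take s.length = s
    · have hsw : PySem.Chars.startswith (seg.drop j) s = true := by
        rw [PySem.Chars.startswith_iff, List.prefix_iff_eq_take]
        exact hp.symm
      rw [if_pos hsw]
      simp [b2i, hp]
    · have hsw : ¬ PySem.Chars.startswith (seg.drop j) s = true := by
        rw [PySem.Chars.startswith_iff, List.prefix_iff_eq_take]
        intro h
        exact hp h.symm
      rw [if_neg hsw]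
      simp [b2i, hp]

-- ---- run splitting ----
theorem getD_append_right {α : Type} (u v : List α) (j : Nat) (d : α) :
    (u ++ v).getD (u.length + j) d = v.getD j d := by
  simp [List.getD, List.getElem?_append_right (Nat.le_add_right u.length j)]

theorem getD_front {α : Type} (u v : List α) (j : Nat) (hj : j < u.length) (d : α) :
    (u ++ v).getD j d = u.getD j d := by
  simp [List.getD, List.getElem?_append_left hj]

theorem hitv_front (s seg : List Char) (t : List (Option Char))
    (ht : t = [] ∨ ∃ t', t = none :: t') (j : Nat) (hj : j < seg.length) :
    hitv s (seg.map some ++ t) j = b2i (decide ((seg.drop j).take s.length = s)) := by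
  have hu : ∀ i, i < seg.length → ∀ (hi : i < seg.length),
      (seg.map some ++ t).getD i none = some seg[i] := by
    intro i _ hi
    rw [getD_front _ _ _ (by simpa using hi)]
    simp [List.getD, List.getElem?_map, List.getElem?_eq_getElem hi]
  have hboundary : (seg.map some ++ t).getD seg.length none = none := by
    have h0 : seg.length = (seg.map some).length + 0 := by simp
    rw [h0, getD_append_right]
    rcases ht with rfl | ⟨t', rfl⟩ <;> simp [List.getD]
  unfold hitv
  rw [hu j hj hj]
  simp only [Option.isSome_some, Bool.true_and]
  by_cases hk : j + s.length ≤ seg.length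
  · have hPQ : (∀ i, (h : i < s.length) → (seg.map some ++ t).getD (j + i) none = some s[i]) ↔
        ((seg.drop j).take s.length = s) := by
      constructor
      · intro h
        apply List.ext_getElem
        · simp; omega
        · intro i hi1 hi2
          have hji : j + i < seg.length := by simp at hi1; omega
          have := h i hi2
          rw [hu (j + i) hji hji] at this
          have hseg : seg[j + i] = s[i] := by
            exact Option.some_injective _ this
          simpa [List.getElem_take, List.getElem_drop] using hseg
      · intro h i hi
        have hji : j + i < seg.length := by omega
        rw [hu (j + i) hji hji]
        have hlen : ((seg.drop j).take s.length).length = s.length := by simp; omega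
        have hi' : i < ((seg.drop j).take s.length).length := by omega
        have h2 := List.getElem_of_eq h hi'
        have h3 : seg[j + i] = ((seg.drop j).take s.length)[i] := by
          simp [List.getElem_take, List.getElem_drop]
        rw [h3, h2]
    unfold matchT
    rw [decide_eq_decide.mpr hPQ]
  · have hk' : seg.length - j < s.length := by omega
    have hmt : matchT s (seg.map some ++ t) j = false := by
      unfold matchT
      simp only [decide_eq_false_iff_not]
      intro hall
      have := hall (seg.length - j) hk'
      rw [show j + (seg.length - j) = seg.length by omega, hboundary] at this
      exact absurd this (by simp)
    have hsl : ¬ ((seg.drop j).take s.length = s) := by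
      intro h
      have := congrArg List.length h
      simp at this
      omega
    rw [hmt]
    simp [b2i, hsl]

theorem hits_map_some (s seg : List Char) : hits s (seg.map some) = cnt s seg := by
  unfold hits cnt
  have hl : (seg.map some : List (Option Char)).length = seg.length := by simp
  rw [hl]
  apply sumR_congr
  intro j hj
  have := hitv_front s seg [] (Or.inl rfl) j hj
  simpa using this

theorem hits_split (s seg : List Char) (t : List (Option Char)) :
    hits s (seg.map some ++ none :: t) = cnt s seg + hits s t := by
  unfold hits
  have hlen : (seg.map some ++ none :: t).length = seg.length + (1 + t.length) := by
    simp; omega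
  rw [hlen, sumR_add, sumR_add]
  have h1 : sumR seg.length (hitv s (seg.map some ++ none :: t)) = cnt s seg := by
    unfold cnt
    apply sumR_congr
    intro j hj
    exact hitv_front s seg (none :: t) (Or.inr ⟨t, rfl⟩) j hj
  have h2 : sumR 1 (fun i => hitv s (seg.map some ++ none :: t) (seg.length + i)) = 0 := by
    apply sumR_zero
    intro i hi
    interval_cases i
    unfold hitv
    have h0 : seg.length + 0 = (seg.map some).length + 0 := by simp
    rw [h0, getD_append_right]
    simp [List.getD, b2i]
  have h3 : ∀ i, i < t.length →
      hitv s (seg.map some ++ none :: t) (seg.length + (1 + i)) = hitv s t i := by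
    intro i hi
    have hD : ∀ i' : Nat, (seg.map some ++ none :: t).getD (seg.length + (1 + i) + i') none
        = t.getD (i + i') none := by
      intro i'
      have e : seg.length + (1 + i) + i' = (seg.map some).length + (1 + (i + i')) := by simp; omega
      rw [e, getD_append_right]
      rw [Nat.add_comm 1 (i + i')]
      simp [List.getD]
    have hDD : (∀ i'', (h : i'' < s.length) →
          (seg.map some ++ none :: t).getD (seg.length + (1 + i) + i'') none = some s[i'']) ↔
        (∀ i'', (h : i'' < s.length) → t.getD (i + i'') none = some s[i'']) := by
      constructor
      · intro hh i'' h
        rw [← hD i'']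
        exact hh i'' h
      · intro hh i'' h
        rw [hD i'']
        exact hh i'' h
    unfold hitv matchT
    rw [decide_eq_decide.mpr hDD]
    have hD0 := hD 0
    rw [Nat.add_zero, Nat.add_zero] at hD0
    rw [hD0]
  rw [h1, h2, sumR_congr h3]
  omega

theorem runFold_eq (s : List Char) : ∀ (t : List (Option Char)) (seg : List Char) (tot : Int),
    (runFold s t (seg, tot)).2 + cnt s (runFold s t (seg, tot)).1 = tot + hits s (seg.map some ++ t) := by
  intro t
  induction t with
  | nil =>
    intro seg tot
    simp only [runFold, List.append_nil, hits_map_some]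
  | cons o t ih =>
    intro seg tot
    cases o with
    | some c =>
      have h : runFold s (some c :: t) (seg, tot) = runFold s t (seg ++ [c], tot) := rfl
      rw [h, ih]
      have : (seg ++ [c]).map some ++ t = seg.map some ++ (some c :: t) := by simp
      rw [this]
    | none =>
      have h : runFold s (none :: t) (seg, tot) = runFold s t ([], tot + cnt s seg) := rfl
      rw [h, ih]
      have : ([] : List Char).map some ++ t = t := by simp
      rw [this, hits_split]
      ring

-- ---- cell helpers ----
theorem b2i_eq (a b : Bool) (h : a = true ↔ b = true) : b2i a = b2i b := by
  cases a <;> cases b <;> simp_all [b2i]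

theorem cellN_eq (strings : List String) (a b : Nat) (ha : a < strings.length) :
    cellN strings a b = (strings[a]).toList[b]? := by
  simp [cellN, List.getElem?_eq_getElem ha]

theorem rowL_eq (strings : List String) (a : Nat) (ha : a < strings.length) :
    rowL strings a = (strings[a]).toList := by
  simp [rowL, List.getD, List.getElem?_eq_getElem ha]

theorem cellN_lt {strings : List String} {a b : Nat} {c : Char} (h : cellN strings a b = some c) :
    a < strings.length ∧ b < (rowL strings a).length := by
  unfold cellN at h
  cases hg : strings[a]? with
  | none => rw [hg] at h; exact absurd h (by simp)
  | some r =>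
    rw [hg] at h
    dsimp only at h
    have ha : a < strings.length := by
      by_contra hc
      rw [List.getElem?_eq_none (by omega)] at hg
      exact absurd hg (by simp)
    have hb : b < r.toList.length := by
      by_contra hc
      rw [List.getElem?_eq_none (by omega)] at h
      exact absurd h (by simp)
    refine ⟨ha, ?_⟩
    rw [rowL_eq strings a ha]
    have : r = strings[a] := by
      have := List.getElem?_eq_getElem ha
      rw [hg] at this
      exact Option.some_injective _ this
    rw [← this]
    exact hb

-- ---- B fold bridge ----
theorem innerFold_eq (strings : List String) (s : List Char) (d : Int) :
    ∀ (ys : List Nat) (hys : ∀ y ∈ ys, y < strings.length) (st : List Char × Int),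
    (ys.foldl
      (fun (st : List Char × Int) (y : Nat) =>
        if 0 ≤ (↑y : Int) + d ∧ (↑y : Int) + d < PySem.Str.len (PySem.List.pyGetD strings (↑y) "") then
          (st.1 ++ [PySem.List.pyGetD (PySem.List.pyGetD strings (↑y) "").toList ((↑y : Int) + d) ' '], st.2)
        else
          ([], st.2 + pvCountOcc st.1 s)) st) =
    runFold s (ys.map (fun y => cellI strings y (↑y + d))) st := by
  intro ys
  induction ys with
  | nil => intro _ st; simp [runFold]
  | cons y ys ih =>
    intro hys st
    have hy : y < strings.length := hys y (by simp)
    simp only [List.foldl_cons, List.map_cons]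
    have hrow : PySem.List.pyGetD strings (↑y) "" = strings[y] := by
      simp [List.getD, List.getElem?_eq_getElem hy]
    have hlen : PySem.Str.len (strings[y]) = (↑(strings[y]).toList.length : Int) := by
      simp [PySem.Str.len_eq]
    by_cases hx : 0 ≤ (↑y : Int) + d
    · by_cases hlt : ((↑y : Int) + d).toNat < (strings[y]).toList.length
      · have hcond : 0 ≤ (↑y : Int) + d ∧ (↑y : Int) + d < PySem.Str.len (PySem.List.pyGetD strings (↑y) "") := by
          rw [hrow, hlen]
          omega
        rw [if_pos hcond]
        have hcell : cellI strings y (↑y + d) = some ((strings[y]).toList[((↑y : Int) + d).toNat]) := by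
          unfold cellI
          rw [if_pos hx, cellN_eq strings y _ hy, List.getElem?_eq_getElem hlt]
        rw [hcell]
        have hchar : PySem.List.pyGetD (PySem.List.pyGetD strings (↑y) "").toList ((↑y : Int) + d) ' '
            = (strings[y]).toList[((↑y : Int) + d).toNat] := by
          rw [hrow]
          exact PySem.List.pyGetD_eq_getElem _ _ hx (by omega)
        rw [hchar]
        exact ih (fun z hz => hys z (by simp [hz])) _
      · have hcond : ¬ (0 ≤ (↑y : Int) + d ∧ (↑y : Int) + d < PySem.Str.len (PySem.List.pyGetD strings (↑y) "")) := by
          rw [hrow, hlen]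
          omega
        rw [if_neg hcond]
        have hcell : cellI strings y (↑y + d) = none := by
          unfold cellI
          rw [if_pos hx, cellN_eq strings y _ hy, List.getElem?_eq_none (by omega)]
        rw [hcell, countOcc_eq]
        exact ih (fun z hz => hys z (by simp [hz])) _
    · have hcond : ¬ (0 ≤ (↑y : Int) + d ∧ (↑y : Int) + d < PySem.Str.len (PySem.List.pyGetD strings (↑y) "")) := by
        omega
      rw [if_neg hcond]
      have hcell : cellI strings y (↑y + d) = none := by
        unfold cellI
        rw [if_neg hx]
      rw [hcell, countOcc_eq]
      exact ih (fun z hz => hys z (by simp [hz])) _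

-- ---- diagonal pointwise ----
theorem hitv_tD (strings : List String) (s : List Char) (d : Int) (y : Nat) (hy : y < strings.length) :
    hitv s (tD strings d) y =
      b2i (decide (0 ≤ ↑y + d ∧ ((↑y + d).toNat < (rowL strings y).length ∧ MA strings s y (↑y + d).toNat = true))) := by
  have hgd : ∀ j : Nat, (tD strings d).getD j none =
      if h : j < strings.length then cellI strings j (↑j + d) else none := by
    intro j
    by_cases h : j < strings.length
    · rw [dif_pos h]
      rw [tD, List.getD, List.getElem?_map, List.getElem?_range h]
      rfl
    · rw [dif_neg h]
      rw [tD, List.getD, List.getElem?_map, List.getElem?_eq_none (by simpa using h)]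
      rfl
  unfold hitv
  apply b2i_eq
  simp only [Bool.and_eq_true, decide_eq_true_eq]
  constructor
  · rintro ⟨hs, hm⟩
    rw [hgd y, dif_pos hy] at hs
    have hx0 : 0 ≤ (↑y : Int) + d := by
      by_contra hc
      unfold cellI at hs
      rw [if_neg hc] at hs
      exact absurd hs (by simp)
    refine ⟨hx0, ?_, ?_⟩
    · unfold cellI at hs
      rw [if_pos hx0] at hs
      cases hcv : cellN strings y ((↑y : Int) + d).toNat with
      | none => rw [hcv] at hs; exact absurd hs (by simp)
      | some c => exact (cellN_lt hcv).2
    · unfold MA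
      simp only [decide_eq_true_eq]
      intro i hi
      unfold matchT at hm
      rw [decide_eq_true_iff] at hm
      have := hm i hi
      rw [hgd (y + i)] at this
      by_cases hyi : y + i < strings.length
      · rw [dif_pos hyi] at this
        unfold cellI at this
        have hx0' : 0 ≤ (↑(y + i) : Int) + d := by push_cast; omega
        rw [if_pos hx0'] at this
        have : cellN strings (y + i) (((↑(y + i) : Int) + d)).toNat = some s[i] := this
        rw [show ((↑(y + i) : Int) + d).toNat = ((↑y : Int) + d).toNat + i from by push_cast; omega] at this
        exact this
      · rw [dif_neg hyi] at this
        exact absurd this (by simp)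
  · rintro ⟨hx0, hlt, hma⟩
    unfold MA at hma
    rw [decide_eq_true_iff] at hma
    have hcells : ∀ i, (h : i < s.length) →
        (tD strings d).getD (y + i) none = some s[i] := by
      intro i hi
      have hc := hma i hi
      have hyi : y + i < strings.length := (cellN_lt hc).1
      rw [hgd (y + i), dif_pos hyi]
      unfold cellI
      have hx0' : 0 ≤ (↑(y + i) : Int) + d := by push_cast; omega
      rw [if_pos hx0']
      rw [show ((↑(y + i) : Int) + d).toNat = ((↑y : Int) + d).toNat + i from by push_cast; omega]
      exact hc
    constructor
    · rw [hgd y, dif_pos hy]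
      unfold cellI
      rw [if_pos hx0]
      have : y < strings.length := hy
      rw [cellN_eq strings y _ hy]
      rw [List.getElem?_eq_getElem (by rw [← rowL_eq strings y hy]; exact hlt)]
      simp
    · unfold matchT
      rw [decide_eq_true_iff]
      exact hcells

-- ---- maxlen facts ----
theorem maxlen_cast_aux (strings : List String) : ∀ (a : Nat),
    strings.foldl (fun m s => max m (PySem.Str.len s)) (↑a)
      = ↑(strings.foldl (fun m s => max m s.toList.length) a) := by
  induction strings with
  | nil => intro a; simp
  | cons r rs ih =>
    intro a
    simp only [List.foldl_cons]
    have h1 : max (↑a) (PySem.Str.len r) = (↑(max a r.toList.length) : Int) := by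
      have : PySem.Str.len r = (↑r.toList.length : Int) := by simp [PySem.Str.len_eq]
      rw [this]
      push_cast
      omega
    rw [h1, ih]

theorem maxlen_cast (strings : List String) :
    strings.foldl (fun m s => max m (PySem.Str.len s)) 0 = ↑(maxlenN strings) := by
  have := maxlen_cast_aux strings 0
  simpa [maxlenN] using this

theorem foldl_max_le_mem (l : List String) : ∀ (a : Nat) (x : String), x ∈ l →
    x.toList.length ≤ l.foldl (fun m s => max m s.toList.length) a := by
  induction l with
  | nil => intro a x hx; exact absurd hx (by simp)
  | cons r rs ih =>
    intro a x hx
    simp only [List.foldl_cons]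
    rcases List.mem_cons.mp hx with rfl | hx'
    · have hinit : ∀ (b : Nat), b ≤ rs.foldl (fun m s => max m s.toList.length) b := by
        clear ih hx
        induction rs with
        | nil => intro b; simp
        | cons q qs ihq =>
          intro b
          simp only [List.foldl_cons]
          exact le_trans (le_max_left b q.toList.length) (ihq _)
      exact le_trans (le_max_right a x.toList.length) (hinit _)
    · exact ih _ x hx'

theorem rowLen_le_maxlen (strings : List String) (y : Nat) (hy : y < strings.length) :
    (rowL strings y).length ≤ maxlenN strings := by
  rw [rowL_eq strings y hy]
  exact foldl_max_le_mem strings 0 _ (List.getElem_mem hy)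

-- ---- per-row reindex ----
theorem reindex (strings : List String) (s : List Char) (y : Nat) (hy : y < strings.length) :
    sumR (strings.length - 1 + maxlenN strings)
      (fun e => hitv s (tD strings (-(↑strings.length - 1) + ↑e)) y) =
    sumR (rowL strings y).length (fun x => b2i (MA strings s y x)) := by
  have hE : strings.length - 1 + maxlenN strings
      = (strings.length - 1 - y) + (y + maxlenN strings) := by omega
  rw [hE, sumR_add]
  have hz1 : sumR (strings.length - 1 - y)
      (fun e => hitv s (tD strings (-(↑strings.length - 1) + ↑e)) y) = 0 := by
    apply sumR_zero
    intro e he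
    rw [hitv_tD strings s _ y hy]
    have hneg : ¬ (0 ≤ (↑y : Int) + (-(↑strings.length - 1) + ↑e) ∧
        (((↑y : Int) + (-(↑strings.length - 1) + ↑e)).toNat < (rowL strings y).length ∧
          MA strings s y ((↑y : Int) + (-(↑strings.length - 1) + ↑e)).toNat = true)) := by
      intro hc
      have := hc.1
      omega
    rw [decide_eq_false hneg]
    rfl
  have hmid : ∀ x, x < y + maxlenN strings →
      hitv s (tD strings (-(↑strings.length - 1) + ↑(strings.length - 1 - y + x))) y
        = (if x < (rowL strings y).length then b2i (MA strings s y x) else 0) := by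
    intro x _
    rw [hitv_tD strings s _ y hy]
    have harith : (↑y : Int) + (-(↑strings.length - 1) + ↑(strings.length - 1 - y + x)) = ↑x := by
      push_cast
      omega
    rw [harith]
    simp only [Int.toNat_natCast]
    by_cases hxL : x < (rowL strings y).length
    · by_cases hMA : MA strings s y x = true
      · simp [hxL, hMA, b2i]
      · simp [hxL, hMA, b2i]
    · simp [hxL, b2i]
  rw [sumR_congr hmid]
  have hL : (rowL strings y).length ≤ maxlenN strings := rowLen_le_maxlen strings y hy
  have hsplit : y + maxlenN strings
      = (rowL strings y).length + (y + maxlenN strings - (rowL strings y).length) := by omega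
  rw [hsplit, sumR_add]
  have hz2 : sumR (y + maxlenN strings - (rowL strings y).length)
      (fun i => if (rowL strings y).length + i < (rowL strings y).length
        then b2i (MA strings s y ((rowL strings y).length + i)) else 0) = 0 := by
    apply sumR_zero
    intro i _
    rw [if_neg (by omega)]
  have hin : sumR (rowL strings y).length
      (fun x => if x < (rowL strings y).length then b2i (MA strings s y x) else 0)
      = sumR (rowL strings y).length (fun x => b2i (MA strings s y x)) := by
    apply sumR_congr
    intro x hx
    rw [if_pos hx]
  rw [hz1, hz2, hin]
  omega

-- ---- B total ----
-- ---- padding a diagonal trace with missing cells does not change its count ----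
theorem hits_cons_none (s : List Char) (t : List (Option Char)) :
    hits s (none :: t) = hits s t := by
  have := hits_split s [] t
  simpa [cnt, sumR] using this

theorem getD_append_none (t : List (Option Char)) (m : Nat) :
    (t ++ [none]).getD m none = t.getD m none := by
  by_cases h : m < t.length
  · rw [getD_front _ _ _ h]
  · by_cases h2 : m = t.length
    · subst h2
      rw [show t.length = t.length + 0 from rfl, getD_append_right]
      simp [List.getD]
    · rw [List.getD, List.getD, List.getElem?_eq_none (by simp; omega),
        List.getElem?_eq_none (by omega)]

theorem hits_append_none (s : List Char) (t : List (Option Char)) :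
    hits s (t ++ [none]) = hits s t := by
  unfold hits
  have hl : (t ++ [none]).length = t.length + 1 := by simp
  rw [hl, sumR_add]
  have h2 : sumR 1 (fun i => hitv s (t ++ [none]) (t.length + i)) = 0 := by
    apply sumR_zero
    intro i hi
    interval_cases i
    unfold hitv
    rw [Nat.add_zero, show t.length = t.length + 0 from rfl, getD_append_right]
    simp [List.getD, b2i]
  have h1 : ∀ j, j < t.length → hitv s (t ++ [none]) j = hitv s t j := by
    intro j hj
    unfold hitv matchT
    simp only [getD_append_none]
  rw [h2, sumR_congr h1]
  omega

theorem hits_replicate_left (s : List Char) : ∀ (p : Nat) (t : List (Option Char)),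
    hits s (List.replicate p none ++ t) = hits s t := by
  intro p
  induction p with
  | zero => intro t; simp
  | succ q ih =>
    intro t
    rw [List.replicate_succ, List.cons_append, hits_cons_none]
    exact ih t

theorem hits_replicate_right (s : List Char) : ∀ (q : Nat) (t : List (Option Char)),
    hits s (t ++ List.replicate q none) = hits s t := by
  intro q
  induction q with
  | zero => intro t; simp
  | succ p ih =>
    intro t
    rw [List.replicate_succ', ← List.append_assoc, hits_append_none]
    exact ih t

theorem hits_window (strings : List String) (s : List Char) (d : Int) (aN bN : Nat)
    (hab : aN ≤ bN) (hbR : bN ≤ strings.length)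
    (hpre : ∀ y, y < aN → cellI strings y (↑y + d) = none)
    (hpost : ∀ y, bN ≤ y → y < strings.length → cellI strings y (↑y + d) = none) :
    hits s ((List.range (bN - aN)).map (fun k => cellI strings (aN + k) (↑(aN + k) + d)))
      = hits s (tD strings d) := by
  have hsplit1 : List.range strings.length
      = List.range (aN + ((bN - aN) + (strings.length - bN))) := by congr 1; omega
  rw [tD, hsplit1, List.range_add, List.range_add]
  simp only [List.map_append, List.map_map, Function.comp_def]
  have hpre' : (List.range aN).map (fun y => cellI strings y (↑y + d))
      = List.replicate aN (none : Option Char) := by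
    rw [show List.replicate aN (none : Option Char)
        = (List.range aN).map (fun _ => (none : Option Char)) from by
      rw [List.map_const', List.length_range]]
    apply List.map_congr_left
    intro y hy
    exact hpre y (List.mem_range.mp hy)
  have hpost' : (List.range (strings.length - bN)).map
        (fun k => cellI strings (aN + (bN - aN + k)) (↑(aN + (bN - aN + k)) + d))
      = List.replicate (strings.length - bN) (none : Option Char) := by
    rw [show List.replicate (strings.length - bN) (none : Option Char)
        = (List.range (strings.length - bN)).map (fun _ => (none : Option Char)) from by
      rw [List.map_const', List.length_range]]
    apply List.map_congr_left
    intro k hk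
    have hk' := List.mem_range.mp hk
    show cellI strings (aN + (bN - aN + k)) (↑(aN + (bN - aN + k)) + d) = none
    have he : aN + (bN - aN + k) = bN + k := by omega
    rw [he]
    exact hpost (bN + k) (by omega) (by omega)
  rw [hpre', hpost', hits_replicate_left, hits_replicate_right]

theorem B_eq (strings : List String) (sub : String) :
    findall_diagonal_alt strings sub =
      sumR (strings.length - 1 + maxlenN strings)
        (fun e => hits sub.toList (tD strings (-(↑strings.length - 1) + ↑e))) := by
  by_cases hnil : strings = []
  · subst hnil
    have h1 : PySem.List.pyRange 0 0 1 = [] := PySem.List.pyRange_one_eq_nil (le_refl 0)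
    simp [findall_diagonal_alt, maxlenN, sumR, h1]
  · have hR : strings.length ≠ 0 := by simpa [List.length_eq_zero_iff] using hnil
    unfold findall_diagonal_alt
    simp only []
    rw [maxlen_cast]
    rw [if_pos (by simpa using hR)]
    rw [PySem.List.pyRange_one (-(↑strings.length - 1)) (↑(maxlenN strings))]
    rw [show ((↑(maxlenN strings) : Int) - (-(↑strings.length - 1))).toNat
        = strings.length - 1 + maxlenN strings from by omega]
    rw [List.foldl_map]
    rw [foldl_sumR (strings.length - 1 + maxlenN strings) _
        (fun e => hits sub.toList (tD strings (-(↑strings.length - 1) + ↑e)))]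
    · simp
    · intro acc e he
      have hR1 : 1 ≤ strings.length := by omega
      set d : Int := -(↑strings.length - 1) + ↑e with hdd
      have hd1 : -(↑strings.length - 1) ≤ d := by
        have : (0 : Int) ≤ ↑e := Int.natCast_nonneg e
        omega
      have hd2 : d < ↑(maxlenN strings) := by
        have : (↑e : Int) < ↑(strings.length - 1 + maxlenN strings) := by
          exact_mod_cast he
        omega
      set aN : Nat := (max 0 (-d)).toNat with haNd
      set bN : Nat := (min (↑strings.length : Int) (↑(maxlenN strings) - d)).toNat with hbNd
      have haN : (max 0 (-d) : Int) = ↑aN := by omega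
      have hbN : (min (↑strings.length : Int) (↑(maxlenN strings) - d)) = ↑bN := by omega
      have hab : aN ≤ bN := by omega
      have hbR : bN ≤ strings.length := by omega
      rw [PySem.List.pyRange_one (max 0 (-d)) (min (↑strings.length) (↑(maxlenN strings) - d))]
      have hlist : (List.range ((min (↑strings.length : Int) (↑(maxlenN strings) - d)
            - max 0 (-d)).toNat)).map (fun (k : Nat) => max 0 (-d) + (↑k : Int))
          = ((List.range (bN - aN)).map (fun k => aN + k)).map (fun (y : Nat) => (↑y : Int)) := by
        rw [List.map_map]
        rw [show ((min (↑strings.length : Int) (↑(maxlenN strings) - d)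
            - max 0 (-d)).toNat) = bN - aN from by omega]
        apply List.map_congr_left
        intro k _
        show max 0 (-d) + (↑k : Int) = ↑(aN + k)
        omega
      rw [hlist, List.foldl_map]
      rw [innerFold_eq strings sub.toList d ((List.range (bN - aN)).map (fun k => aN + k))
        (by
          intro z hz
          rcases List.mem_map.mp hz with ⟨k, hk, rfl⟩
          have := List.mem_range.mp hk
          omega) ([], acc)]
      rw [countOcc_eq]
      simp only [List.map_map, Function.comp_def]
      have hrun := runFold_eq sub.toList
        ((List.range (bN - aN)).map (fun k => cellI strings (aN + k) (↑(aN + k) + d)))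
        [] acc
      simp only [List.map_nil, List.nil_append] at hrun
      have hpre : ∀ y, y < aN → cellI strings y (↑y + d) = none := by
        intro y hy
        unfold cellI
        rw [if_neg (by omega)]
      have hpost : ∀ y, bN ≤ y → y < strings.length → cellI strings y (↑y + d) = none := by
        intro y hy hyR
        have hge : (↑(maxlenN strings) : Int) ≤ ↑y + d := by omega
        unfold cellI
        by_cases h0 : 0 ≤ (↑y : Int) + d
        · rw [if_pos h0, cellN_eq strings y _ hyR, List.getElem?_eq_none]
          have hle := rowLen_le_maxlen strings y hyR
          rw [rowL_eq strings y hyR] at hle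
          omega
        · rw [if_neg h0]
      have hwin := hits_window strings sub.toList d aN bN hab hbR hpre hpost
      rw [hrun, hwin]

theorem hits_tD_sum (strings : List String) (s : List Char) (d : Int) :
    hits s (tD strings d) = sumR strings.length (fun y => hitv s (tD strings d) y) := by
  unfold hits
  have : (tD strings d).length = strings.length := by simp [tD]
  rw [this]

-- ===== VERDICT (by name: the statement is the Claim_ definition above) =====
theorem findall_diagonal_spec : Claim_equal_findall_diagonal := by
  intro strings sub _
  unfold Spec_findall_diagonal
  rw [A_eq_ASum, B_eq]
  unfold ASum
  have h1 : sumR (strings.length - 1 + maxlenN strings)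
      (fun e => hits sub.toList (tD strings (-(↑strings.length - 1) + ↑e)))
      = sumR (strings.length - 1 + maxlenN strings)
        (fun e => sumR strings.length
          (fun y => hitv sub.toList (tD strings (-(↑strings.length - 1) + ↑e)) y)) := by
    apply sumR_congr
    intro e _
    rw [hits_tD_sum]
  rw [h1, sumR_comm]
  apply sumR_congr
  intro y hy
  rw [reindex strings sub.toList y hy]
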